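-- pv_equiv track=rewrite | github.com/jmuhyc/hyc-agent | src/agents/search_agent/tools/fuzzy_search.py | _compute_char_bits
-- ===== SOURCE A (Python) =====
-- def _compute_char_bits(path: str) -> int:
--     """计算路径的字符位图 (a-z)"""
--     bits = 0
--     for char in path:
--         if 'a' <= char <= 'z':
--             bits |= 1 << (ord(char) - ord('a'))
--         elif '0' <= char <= '9':
--             pass
--     return bits
-- ===== SOURCE B (Python) =====
-- def _compute_char_bits(path: str) -> int:
--     """Alphabet-driven version: for each of the 26 letters, test membership in path."""
--     bits = 0
--     for i in range(26):
--         if chr(97 + i) in path: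
--             bits |= 1 << i
--     return bits
-- ===== Notes on version B (the rewrite author's own statement) =====
-- stated objective: faster
-- what changed: Inverts the traversal: instead of one interpreted pass over the string's characters setting each letter's bit, B loops over the 26 alphabet letters and uses the built-in substring membership test for each, setting bit i when chr(97+i) occurs.
import Mathlib
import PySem

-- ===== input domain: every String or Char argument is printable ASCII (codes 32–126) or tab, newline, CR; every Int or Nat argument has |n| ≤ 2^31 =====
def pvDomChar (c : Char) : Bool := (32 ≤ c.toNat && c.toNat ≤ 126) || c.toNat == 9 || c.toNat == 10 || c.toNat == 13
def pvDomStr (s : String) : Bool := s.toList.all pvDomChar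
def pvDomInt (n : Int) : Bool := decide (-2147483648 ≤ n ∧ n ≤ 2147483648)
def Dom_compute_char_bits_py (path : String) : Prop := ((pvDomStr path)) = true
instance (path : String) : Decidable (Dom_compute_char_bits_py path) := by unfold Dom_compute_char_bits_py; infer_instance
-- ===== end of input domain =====

-- B inverts the traversal (per-alphabet-letter membership scan instead of one pass over the characters); alternative decomposition, same result.

-- ===== PORT A =====
-- A: one pass over the characters of path; a-z letters set their bit; the digit branch is a `pass` (no-op).
-- bits stays a nonnegative Python int throughout, modelled as Nat and cast to Int at the end.
def compute_char_bits_py (path : String) : Int :=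
  ((path.toList.foldl (fun bits c =>
      if 'a' ≤ c ∧ c ≤ 'z' then bits ||| (1 <<< (c.toNat - 'a'.toNat))
      else if '0' ≤ c ∧ c ≤ '9' then bits
      else bits) 0 : Nat) : Int)

-- ===== PORT B =====
-- B: for i in range(26), set bit i iff chr(97+i) occurs in path.
def compute_char_bits_py_alt (path : String) : Int :=
  (((List.range 26).foldl (fun bits i =>
      if Char.ofNat (97 + i) ∈ path.toList then bits ||| (1 <<< i)
      else bits) 0 : Nat) : Int)

-- ===== PRECONDITION & SPEC =====
def Spec_compute_char_bits_py (path : String) (out : Int) : Prop := out = compute_char_bits_py_alt path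
instance (path : String) (out : Int) : Decidable (Spec_compute_char_bits_py path out) := by unfold Spec_compute_char_bits_py; infer_instance

-- ===== CLAIM (what is proved, stated in full; the proofs are below) =====
def Claim_equal_compute_char_bits_py : Prop := ∀ (path : String), Dom_compute_char_bits_py path → Spec_compute_char_bits_py path (compute_char_bits_py path)

-- ===== LEMMAS AND PROOFS =====

-- bit i of A's fold: set iff already set in the accumulator, or some a-z letter of the list has index i
theorem pv_testBit_foldA (l : List Char) (b : Nat) (i : Nat) :
    (l.foldl (fun bits c =>
      if 'a' ≤ c ∧ c ≤ 'z' then bits ||| (1 <<< (c.toNat - 'a'.toNat))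
      else if '0' ≤ c ∧ c ≤ '9' then bits
      else bits) b).testBit i
    = (b.testBit i || l.any (fun c => decide ('a' ≤ c ∧ c ≤ 'z') && decide (c.toNat - 'a'.toNat = i))) := by
  induction l generalizing b with
  | nil => simp
  | cons c t ih =>
    simp only [List.foldl_cons, List.any_cons]
    by_cases h : 'a' ≤ c ∧ c ≤ 'z'
    · rw [if_pos h, ih, Nat.testBit_or, Nat.shiftLeft_eq, one_mul, Nat.testBit_two_pow,
        decide_eq_true h, Bool.true_and, Bool.or_assoc]
    · rw [if_neg h]
      split_ifs with hd <;> rw [ih] <;> simp [h]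

-- bit i of B's fold over range n: set iff already set, or i < n and letter i occurs in l
theorem pv_testBit_foldB (l : List Char) (n : Nat) (b : Nat) (i : Nat) :
    ((List.range n).foldl (fun bits j =>
      if Char.ofNat (97 + j) ∈ l then bits ||| (1 <<< j)
      else bits) b).testBit i
    = (b.testBit i || (decide (i < n) && decide (Char.ofNat (97 + i) ∈ l))) := by
  induction n generalizing b with
  | zero => simp
  | succ n ih =>
    rw [List.range_succ, List.foldl_append, List.foldl_cons, List.foldl_nil]
    by_cases hm : Char.ofNat (97 + n) ∈ l
    · rw [if_pos hm, Nat.testBit_or, ih, Nat.shiftLeft_eq, one_mul, Nat.testBit_two_pow]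
      by_cases he : i = n
      · subst he; simp [hm]
      · have h1 : decide (n = i) = false := by simp [Ne.symm he]
        have h2 : decide (i < n + 1) = decide (i < n) := by
          simp only [decide_eq_decide]; omega
        rw [h1, h2]; simp
    · rw [if_neg hm, ih]
      by_cases he : i = n
      · subst he; simp [hm]
      · have h2 : decide (i < n + 1) = decide (i < n) := by
          simp only [decide_eq_decide]; omega
        rw [h2]

-- for a lowercase letter c, its bit index is < 26 and reconstructs the letter
theorem pv_char_index (c : Char) (h : 'a' ≤ c ∧ c ≤ 'z') :
    c.toNat - 'a'.toNat < 26 ∧ Char.ofNat (97 + (c.toNat - 'a'.toNat)) = c := by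
  have h1 : 97 ≤ c.toNat := by simpa [Char.le_def] using h.1
  have h2 : c.toNat ≤ 122 := by simpa [Char.le_def] using h.2
  constructor
  · show c.toNat - 97 < 26; omega
  · have he : 97 + (c.toNat - 'a'.toNat) = c.toNat := by
      show 97 + (c.toNat - 97) = c.toNat; omega
    rw [he]
    exact Char.ofNat_toNat c

-- the i-th alphabet letter is a lowercase letter with code 97 + i
theorem pv_ofNat_lower (i : Nat) (hi : i < 26) :
    'a' ≤ Char.ofNat (97 + i) ∧ Char.ofNat (97 + i) ≤ 'z' ∧ (Char.ofNat (97 + i)).toNat = 97 + i := by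
  have ht : (Char.ofNat (97 + i)).toNat = 97 + i := by
    rw [Char.toNat_ofNat, if_pos (Or.inl (by omega))]
  have ht' : (Char.ofNat (97 + i)).val.toNat = 97 + i := ht
  have ha : ('a').val.toNat = 97 := rfl
  have hz : ('z').val.toNat = 122 := rfl
  refine ⟨?_, ?_, ht⟩ <;> rw [Char.le_def, UInt32.le_iff_toNat_le] <;> omega

-- the two Nat folds agree bitwise
theorem pv_folds_eq (l : List Char) :
    (l.foldl (fun bits c =>
      if 'a' ≤ c ∧ c ≤ 'z' then bits ||| (1 <<< (c.toNat - 'a'.toNat))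
      else if '0' ≤ c ∧ c ≤ '9' then bits
      else bits) 0)
    = ((List.range 26).foldl (fun bits j =>
      if Char.ofNat (97 + j) ∈ l then bits ||| (1 <<< j)
      else bits) 0) := by
  apply Nat.eq_of_testBit_eq
  intro i
  rw [pv_testBit_foldA, pv_testBit_foldB]
  simp only [Nat.zero_testBit, Bool.false_or]
  rw [Bool.eq_iff_iff]
  simp only [List.any_eq_true, Bool.and_eq_true, decide_eq_true_eq]
  constructor
  · rintro ⟨c, hc, hlc, hidx⟩
    obtain ⟨hlt, hchar⟩ := pv_char_index c hlc
    subst hidx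
    exact ⟨hlt, by rw [hchar]; exact hc⟩
  · rintro ⟨hi, hm⟩
    obtain ⟨hle, hge, ht⟩ := pv_ofNat_lower i hi
    exact ⟨Char.ofNat (97 + i), hm, ⟨hle, hge⟩, by rw [ht]; show 97 + i - 97 = i; omega⟩

-- ===== VERDICT (by name: the statement is the Claim_ definition above) =====
theorem compute_char_bits_py_spec : Claim_equal_compute_char_bits_py := by
  intro path _
  show compute_char_bits_py path = compute_char_bits_py_alt path
  unfold compute_char_bits_py compute_char_bits_py_alt
  exact congrArg (fun n : Nat => (n : Int)) (pv_folds_eq path.toList)
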